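-- pv_equiv track=rewrite | github.com/miliar/Code_Jam_Webscraper | solutions_python/Problem_200/3303.py | solve
-- ===== SOURCE A (Python) =====
-- def parse_input(str):
--     str_first_val = str.split()
--     real_digits = [ int(c) for c in str_first_val[0] ]
--     return real_digits
--
-- def solve(test):
-- 	big_number = parse_input(test)
--
-- 	num_of_digits = len(big_number)
--
-- 	index_of_max_incrising_digit = 0
-- 	for digit_ind in range(0,num_of_digits):
-- 		if( big_number[digit_ind] > big_number[index_of_max_incrising_digit] ):
-- 			index_of_max_incrising_digit = digit_ind;
-- 		elif ( big_number[digit_ind] < big_number[index_of_max_incrising_digit] ):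
-- 			big_number[index_of_max_incrising_digit] -= 1
-- 			for digit_ind_in_change in range(index_of_max_incrising_digit+1,num_of_digits):
-- 				big_number[digit_ind_in_change] = 9
-- 			break
--
-- 	num_in_str = ''.join(map(str,big_number))
--
-- 	if( num_in_str[0] == '0'):
-- 		num_in_str = num_in_str[1:]
-- 	return num_in_str
-- ===== SOURCE B (Python) =====
-- def solve(test):
--     digits = [int(c) for c in test.split()[0]]
--     n = len(digits)
--
--     def tidy(ds):
--         return all(ds[k] <= ds[k + 1] for k in range(len(ds) - 1))
--
--     cands = [digits] + [digits[:q] + [digits[q] - 1] + [9] * (n - 1 - q)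
--                         for q in range(n) if digits[q] >= 1]
--     best = max(c for c in cands if tidy(c))
--     s = ''.join(map(str, best))
--     return s[1:] if s[0] == '0' else s
-- ===== Notes on version B (the rewrite author's own statement) =====
-- stated objective: alternative
-- what changed: Replaces A's single greedy left-to-right running-max-index pass by brute-force candidate enumeration: build the number itself plus, for each digit position, the candidate that decrements that digit and fills the remaining positions with nines, filter the tidy (non-decreasing) ones, and return the lexicographic maximum via max().
import Mathlib
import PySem

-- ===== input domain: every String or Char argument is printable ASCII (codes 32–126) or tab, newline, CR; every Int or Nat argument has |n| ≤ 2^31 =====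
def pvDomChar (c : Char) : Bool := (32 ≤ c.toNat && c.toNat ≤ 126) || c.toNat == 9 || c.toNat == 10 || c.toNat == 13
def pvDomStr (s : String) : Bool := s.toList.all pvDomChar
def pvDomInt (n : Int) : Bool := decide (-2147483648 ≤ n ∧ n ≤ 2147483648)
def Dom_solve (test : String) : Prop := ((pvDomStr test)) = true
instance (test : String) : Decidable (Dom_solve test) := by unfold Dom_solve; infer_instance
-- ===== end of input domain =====

-- B replaces A's single greedy left-to-right pass by brute-force candidate enumeration:
-- build the number itself plus every candidate that decrements one digit and fills the rest
-- with nines, keep the tidy ones, return the lexicographically largest; alternative algorithm.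

-- ===== PORT A =====
def parse_input (str : String) : List Int :=
  let strFirstVal := PySem.Str.split₀ str
  ((PySem.List.pyGet? strFirstVal 0).getD "").toList.map
    (fun c => (PySem.Int.ofStr? (String.ofList [c])).getD 0)

-- inner loop: for digit_ind_in_change in range(idx+1, n): big[digit_ind_in_change] = 9
def solveFill9 (big : List Int) (idx n : Nat) : List Int :=
  (PySem.List.pyRange ((idx : Int) + 1) (n : Int) 1).foldl
    (fun b k => PySem.List.pySetD b k 9) big

-- outer loop of A: running first-index-of-max, break (returning) on first smaller digit
def solveLoopA (big : List Int) (n idx i : Nat) : List Int :=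
  if h : i < n then
    if PySem.List.pyGetD big (i : Int) 0 > PySem.List.pyGetD big (idx : Int) 0 then
      solveLoopA big n i (i + 1)
    else if PySem.List.pyGetD big (i : Int) 0 < PySem.List.pyGetD big (idx : Int) 0 then
      solveFill9 (PySem.List.pySetD big (idx : Int) (PySem.List.pyGetD big (idx : Int) 0 - 1)) idx n
    else
      solveLoopA big n idx (i + 1)
  else big
termination_by n - i

def solve (test : String) : String :=
  let bigNumber := parse_input test
  let numOfDigits := bigNumber.length
  let result := solveLoopA bigNumber numOfDigits 0 0
  let numInStr := PySem.Str.join "" (result.map PySem.Int.toStr)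
  if PySem.Str.pyGet? numInStr 0 == some '0' then PySem.Str.slice numInStr (some 1) none
  else numInStr

-- ===== PORT B =====
-- def tidy(ds): return all(ds[k] <= ds[k+1] for k in range(len(ds)-1))
def tidyB (ds : List Int) : Bool :=
  (PySem.List.pyRange 0 ((ds.length : Int) - 1) 1).all
    (fun k => decide (PySem.List.pyGetD ds k 0 ≤ PySem.List.pyGetD ds (k + 1) 0))

-- cands = [digits] + [digits[:q] + [digits[q]-1] + [9]*(n-1-q) for q in range(n) if digits[q] >= 1]
def candsB (digits : List Int) (n : Nat) : List (List Int) :=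
  [digits] ++
    (((PySem.List.pyRange 0 (n : Int) 1).filter
        (fun q => decide (1 ≤ PySem.List.pyGetD digits q 0))).map
      (fun q => PySem.List.slice digits none (some q)
        ++ [PySem.List.pyGetD digits q 0 - 1]
        ++ PySem.List.pyRepeat [(9 : Int)] ((n : Int) - 1 - q)))

def solve_alt (test : String) : String :=
  let digits := ((PySem.List.pyGet? (PySem.Str.split₀ test) 0).getD "").toList.map
      (fun c => (PySem.Int.ofStr? (String.ofList [c])).getD 0)
  let n := digits.length
  -- best = max(c for c in cands if tidy(c))  (max of a nonempty selection under Pre_)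
  let best := (PySem.List.max? ((candsB digits n).filter tidyB) (fun c => c)).getD []
  let s := PySem.Str.join "" (best.map PySem.Int.toStr)
  if PySem.Str.pyGet? s 0 == some '0' then PySem.Str.slice s (some 1) none else s

-- ===== PRECONDITION & SPEC =====
-- Pre_ excludes exactly the inputs where Python A raises: no whitespace-separated token
-- (IndexError) or a non-digit character in the first token (ValueError in int(c)).
def Pre_solve (test : String) : Prop :=
  PySem.Str.split₀ test ≠ [] ∧
    PySem.Chars.strIsdigit ((PySem.Str.split₀ test).headD "").toList = true
instance (test : String) : Decidable (Pre_solve test) := by unfold Pre_solve; infer_instance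
def pvWitness_solve : String := "132"

def Spec_solve (test : String) (out : String) : Prop := out = solve_alt test
instance (test : String) (out : String) : Decidable (Spec_solve test out) := by unfold Spec_solve; infer_instance

-- ===== CLAIM (what is proved, stated in full; the proofs are below) =====
def Claim_equal_solve : Prop := ∀ (test : String), Dom_solve test → Pre_solve test → Spec_solve test (solve test)

-- ===== LEMMAS AND PROOFS =====

-- proof-side scans characterising A's loop: first descent position and plateau start
def descScan (ds : List Int) (n j : Nat) : Nat :=
  if h : j < n ∧ PySem.List.pyGetD ds ((j : Int) - 1) 0 ≤ PySem.List.pyGetD ds (j : Int) 0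
  then descScan ds n (j + 1) else j
termination_by n - j
decreasing_by omega

def platScan (ds : List Int) (i : Nat) : Nat :=
  if h : 0 < i ∧ PySem.List.pyGetD ds ((i : Int) - 1) 0 = PySem.List.pyGetD ds (i : Int) 0
  then platScan ds (i - 1) else i
termination_by i
decreasing_by omega

-- the candidate "digits[:q] + [digits[q]-1] + [9]*(n-1-q)" in take/replicate form
def candT (ds : List Int) (q : Nat) : List Int :=
  ds.take q ++ [ds.getD q 0 - 1] ++ List.replicate (ds.length - 1 - q) 9

lemma pyGetD_cast_sub_one (ds : List Int) (m : Nat) (h : 1 ≤ m) :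
    PySem.List.pyGetD ds ((m : Int) - 1) 0 = ds.getD (m - 1) 0 := by
  have : ((m : Int) - 1) = ((m - 1 : Nat) : Int) := by omega
  rw [this, PySem.List.pyGetD_natCast]

lemma descScan_ge (ds : List Int) (n j : Nat) : j ≤ descScan ds n j := by
  induction j using descScan.induct ds n with
  | case1 j h ih => rw [descScan, dif_pos h]; omega
  | case2 j h => rw [descScan, dif_neg h]

lemma descScan_le (ds : List Int) (n j : Nat) (h : j ≤ n) : descScan ds n j ≤ n := by
  induction j using descScan.induct ds n with
  | case1 j h' ih => rw [descScan, dif_pos h']; exact ih (by omega)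
  | case2 j h' => rw [descScan, dif_neg h']; by_cases hj : j < n <;> omega

lemma descScan_nondec (ds : List Int) (n j : Nat) (hj : 1 ≤ j) :
    ∀ k, j ≤ k → k < descScan ds n j → ds.getD (k - 1) 0 ≤ ds.getD k 0 := by
  induction j using descScan.induct ds n with
  | case1 j h ih =>
    intro k hk1 hk2
    rw [descScan, dif_pos h] at hk2
    by_cases hkj : k = j
    · subst hkj
      have := h.2
      rwa [pyGetD_cast_sub_one ds k hj, PySem.List.pyGetD_natCast] at this
    · exact ih (by omega) k (by omega) hk2
  | case2 j h =>
    intro k hk1 hk2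
    rw [descScan, dif_neg h] at hk2
    omega

lemma descScan_desc (ds : List Int) (n j : Nat) (hj : 1 ≤ j)
    (h : descScan ds n j < n) :
    ds.getD (descScan ds n j) 0 < ds.getD (descScan ds n j - 1) 0 := by
  induction j using descScan.induct ds n with
  | case1 j h' ih => rw [descScan, dif_pos h'] at h ⊢; exact ih (by omega) h
  | case2 j h' =>
    rw [descScan, dif_neg h'] at h ⊢
    push_neg at h'
    have := h' h
    rw [pyGetD_cast_sub_one ds j hj, PySem.List.pyGetD_natCast] at this
    omega

lemma platScan_le (ds : List Int) (i : Nat) : platScan ds i ≤ i := by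
  induction i using platScan.induct ds with
  | case1 i h ih => rw [platScan, dif_pos h]; omega
  | case2 i h => rw [platScan, dif_neg h]

lemma platScan_plateau (ds : List Int) (m : Nat) :
    ∀ k, platScan ds m ≤ k → k ≤ m → ds.getD k 0 = ds.getD m 0 := by
  induction m using platScan.induct ds with
  | case1 m h ih =>
    intro k hk1 hk2
    rw [platScan, dif_pos h] at hk1
    by_cases hkm : k = m
    · rw [hkm]
    · have hkk := ih k hk1 (by omega)
      have h2 := h.2
      rw [pyGetD_cast_sub_one ds m (by omega), PySem.List.pyGetD_natCast] at h2
      rw [hkk, h2]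
  | case2 m h =>
    intro k hk1 hk2
    rw [platScan, dif_neg h] at hk1
    have : k = m := by omega
    rw [this]

lemma platScan_stop (ds : List Int) (m : Nat) (h0 : 0 < platScan ds m) :
    ds.getD (platScan ds m - 1) 0 ≠ ds.getD (platScan ds m) 0 := by
  induction m using platScan.induct ds with
  | case1 m h ih => rw [platScan, dif_pos h] at h0 ⊢; exact ih h0
  | case2 m h =>
    rw [platScan, dif_neg h] at h0 ⊢
    push_neg at h
    have := h h0
    rwa [pyGetD_cast_sub_one ds m (by omega), PySem.List.pyGetD_natCast] at this
lemma platScan_eq (ds : List Int) (idx m : Nat)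
    (hm : idx ≤ m)
    (hplat : ∀ k, idx ≤ k → k ≤ m → ds.getD k 0 = ds.getD idx 0)
    (hstart : idx = 0 ∨ ds.getD (idx - 1) 0 < ds.getD idx 0) :
    platScan ds m = idx := by
  induction m with
  | zero =>
    rw [platScan, dif_neg (by simp)]
    omega
  | succ m ih =>
    rw [platScan]
    by_cases hidxm : idx = m + 1
    · have hcond : ¬ (0 < m + 1 ∧ PySem.List.pyGetD ds ((↑(m + 1) : Int) - 1) 0
          = PySem.List.pyGetD ds (↑(m + 1) : Int) 0) := by
        rw [pyGetD_cast_sub_one ds (m + 1) (by omega), PySem.List.pyGetD_natCast]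
        rcases hstart with h0 | hlt
        · omega
        · intro ⟨_, heq⟩
          rw [← hidxm] at heq
          omega
      rw [dif_neg hcond]
      omega
    · have hmle : idx ≤ m := by omega
      have hcond : (0 < m + 1 ∧ PySem.List.pyGetD ds ((↑(m + 1) : Int) - 1) 0
          = PySem.List.pyGetD ds (↑(m + 1) : Int) 0) := by
        refine ⟨by omega, ?_⟩
        rw [pyGetD_cast_sub_one ds (m + 1) (by omega), PySem.List.pyGetD_natCast]
        simp only [Nat.add_sub_cancel]
        rw [hplat m hmle (by omega), hplat (m + 1) (by omega) (by omega)]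
      rw [dif_pos hcond]
      simp only [Nat.add_sub_cancel]
      exact ih hmle (fun k hk1 hk2 => hplat k hk1 (by omega))

lemma take_succ_set (ds : List Int) (idx : Nat) (v : Int) (h : idx < ds.length) :
    (ds.set idx v).take (idx + 1) = ds.take idx ++ [v] := by
  apply List.ext_getElem
  · simp; omega
  · intro k h1 h2
    simp only [List.getElem_take, List.getElem_set]
    rcases Nat.lt_or_ge k idx with hk | hk
    · rw [if_neg (by omega : ¬ idx = k), List.getElem_append_left (by simp; omega)]
      simp
    · have hk' : k = idx := by simp at h1; omega
      subst hk'
      simp [List.getElem_append_right, List.length_take, Nat.min_eq_left (Nat.le_of_lt h)]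

lemma fill_eq (bs : List Int) (lo : Nat) (hlo : lo ≤ bs.length) :
    (PySem.List.pyRange ((lo : Int)) ((bs.length : Int)) 1).foldl
      (fun b k => PySem.List.pySetD b k 9) bs
    = bs.take lo ++ List.replicate (bs.length - lo) 9 := by
  induction hn : bs.length - lo generalizing bs lo with
  | zero =>
    have : (bs.length : Int) ≤ lo := by omega
    rw [PySem.List.pyRange_one_eq_nil this]
    have hlo' : lo = bs.length := by omega
    simp [hlo', List.take_of_length_le]
  | succ n ih =>
    have hlt : (lo : Int) < (bs.length : Int) := by omega
    rw [PySem.List.pyRange_one_cons hlt]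
    simp only [List.foldl_cons, PySem.List.pySetD_natCast]
    have hlen : (bs.set lo 9).length = bs.length := by simp
    have hcast : ((lo : Int) + 1) = ((lo + 1 : Nat) : Int) := by omega
    rw [hcast, ← hlen, ih (bs.set lo 9) (lo + 1) (by omega) (by omega)]
    rw [take_succ_set bs lo 9 (by omega)]
    simp [List.replicate_succ, List.append_assoc]

lemma loopA_eq (ds : List Int) (idx i : Nat)
    (hidx : idx < i)
    (hplat : ∀ k, idx ≤ k → k < i → ds.getD k 0 = ds.getD idx 0)
    (hstart : idx = 0 ∨ ds.getD (idx - 1) 0 < ds.getD idx 0) :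
    solveLoopA ds ds.length idx i =
      (if descScan ds ds.length i < ds.length then
        candT ds (platScan ds (descScan ds ds.length i - 1))
      else ds) := by
  induction hn : ds.length - i generalizing idx i with
  | zero =>
    have hni : ¬ i < ds.length := by omega
    rw [solveLoopA, dif_neg hni, descScan]
    have hcond : ¬ (i < ds.length ∧ PySem.List.pyGetD ds ((i : Int) - 1) 0
        ≤ PySem.List.pyGetD ds (i : Int) 0) := by intro ⟨h1, _⟩; omega
    rw [dif_neg hcond, if_neg hni]
  | succ n ih =>
    have hi : i < ds.length := by omega
    have hi1 : 1 ≤ i := by omega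
    have hprev : ds.getD (i - 1) 0 = ds.getD idx 0 := hplat (i - 1) (by omega) (by omega)
    rw [solveLoopA, dif_pos hi]
    simp only [PySem.List.pyGetD_natCast]
    by_cases hgt : ds.getD i 0 > ds.getD idx 0
    · simp only [hgt, if_pos]
      have hjs : descScan ds ds.length i = descScan ds ds.length (i + 1) := by
        rw [descScan]
        have hcond : (i < ds.length ∧ PySem.List.pyGetD ds ((i : Int) - 1) 0
            ≤ PySem.List.pyGetD ds (i : Int) 0) := by
          refine ⟨hi, ?_⟩
          rw [pyGetD_cast_sub_one ds i hi1, PySem.List.pyGetD_natCast, hprev]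
          omega
        rw [dif_pos hcond]
      rw [hjs]
      exact ih i (i + 1) (by omega)
        (fun k hk1 hk2 => congrArg (fun t => ds.getD t 0) (by omega : k = i))
        (Or.inr (by rw [hprev]; exact hgt)) (by omega)
    · by_cases hlt : ds.getD i 0 < ds.getD idx 0
      · simp only [hgt, if_neg, hlt, if_pos, not_false_iff]
        have hjs : descScan ds ds.length i = i := by
          rw [descScan]
          have hcond : ¬ (i < ds.length ∧ PySem.List.pyGetD ds ((i : Int) - 1) 0
              ≤ PySem.List.pyGetD ds (i : Int) 0) := by
            rw [pyGetD_cast_sub_one ds i hi1, PySem.List.pyGetD_natCast, hprev]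
            intro ⟨_, hle⟩; omega
          rw [dif_neg hcond]
        rw [hjs, if_pos hi]
        have hisc : platScan ds (i - 1) = idx :=
          platScan_eq ds idx (i - 1) (by omega)
            (fun k hk1 hk2 => hplat k hk1 (by omega)) hstart
        rw [hisc]
        unfold candT
        unfold solveFill9
        rw [PySem.List.pySetD_natCast]
        have hcast : ((idx : Int) + 1) = ((idx + 1 : Nat) : Int) := by omega
        have hlen2 : (ds.set idx (ds.getD idx 0 - 1)).length = ds.length := by simp
        rw [hcast, ← hlen2, fill_eq _ (idx + 1) (by omega), hlen2,
          take_succ_set ds idx _ (by omega)]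
        have : ds.length - (idx + 1) = ds.length - 1 - idx := by omega
        rw [this, List.append_assoc]
      · have heq : ds.getD i 0 = ds.getD idx 0 := by omega
        simp only [hgt, if_neg, hlt, if_neg, not_false_iff]
        have hjs : descScan ds ds.length i = descScan ds ds.length (i + 1) := by
          rw [descScan]
          have hcond : (i < ds.length ∧ PySem.List.pyGetD ds ((i : Int) - 1) 0
              ≤ PySem.List.pyGetD ds (i : Int) 0) := by
            refine ⟨hi, ?_⟩
            rw [pyGetD_cast_sub_one ds i hi1, PySem.List.pyGetD_natCast, hprev, heq]
          rw [dif_pos hcond]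
        rw [hjs]
        exact ih idx (i + 1) (by omega)
          (fun k hk1 hk2 => by
            rcases Nat.lt_or_ge k i with hk | hk
            · exact hplat k hk1 hk
            · have : k = i := by omega
              rw [this, heq])
          hstart (by omega)

lemma lists_eq (ds : List Int) :
    solveLoopA ds ds.length 0 0 =
      (if descScan ds ds.length 1 < ds.length then
        candT ds (platScan ds (descScan ds ds.length 1 - 1))
      else ds) := by
  by_cases hnil : ds.length = 0
  · have h1 : ¬ (0 : Nat) < ds.length := by omega
    rw [solveLoopA, dif_neg h1, descScan]
    have hcond : ¬ (1 < ds.length ∧ PySem.List.pyGetD ds (((1 : Nat) : Int) - 1) 0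
        ≤ PySem.List.pyGetD ds ((1 : Nat) : Int) 0) := by intro ⟨h, _⟩; omega
    rw [dif_neg hcond, if_neg (by omega : ¬ (1 : Nat) < ds.length)]
  · have h0 : (0 : Nat) < ds.length := by omega
    rw [solveLoopA, dif_pos h0, if_neg (by simp), if_neg (by simp)]
    exact loopA_eq ds 0 1 (by omega)
      (fun k hk1 hk2 => congrArg (fun t => ds.getD t 0) (by omega : k = 0)) (Or.inl rfl)
-- ---- B-side: characterising tidyB, the candidate list, and the maximum ----

lemma tidyB_iff (xs : List Int) :
    tidyB xs = true ↔ ∀ k : Nat, k + 1 < xs.length → xs.getD k 0 ≤ xs.getD (k + 1) 0 := by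
  unfold tidyB
  rw [List.all_eq_true]
  constructor
  · intro h k hk
    have hmem : (k : Int) ∈ PySem.List.pyRange 0 ((xs.length : Int) - 1) 1 := by
      rw [PySem.List.mem_pyRange_one]
      omega
    have := h _ hmem
    rw [decide_eq_true_eq] at this
    have hc : ((k : Int) + 1) = ((k + 1 : Nat) : Int) := by omega
    rwa [hc, PySem.List.pyGetD_natCast, PySem.List.pyGetD_natCast] at this
  · intro h x hx
    rw [PySem.List.mem_pyRange_one] at hx
    rw [decide_eq_true_eq]
    have hxk : x = ((x.toNat : Nat) : Int) := by omega
    rw [hxk]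
    have hc : ((x.toNat : Int) + 1) = ((x.toNat + 1 : Nat) : Int) := by omega
    rw [hc, PySem.List.pyGetD_natCast, PySem.List.pyGetD_natCast]
    exact h x.toNat (by omega)

lemma candT_length (ds : List Int) (q : Nat) (hq : q < ds.length) :
    (candT ds q).length = ds.length := by
  unfold candT
  simp [List.length_take]
  omega

lemma candT_getD (ds : List Int) (q k : Nat) (hq : q < ds.length) :
    (candT ds q).getD k 0 =
      if k < q then ds.getD k 0
      else if k = q then ds.getD q 0 - 1
      else if k < ds.length then 9 else 0 := by
  unfold candT
  set a := ds.getD q 0 - 1 with ha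
  rcases Nat.lt_trichotomy k q with hk | hk | hk
  · rw [if_pos hk]
    rw [List.getD_eq_getElem?_getD, List.getD_eq_getElem?_getD,
      List.getElem?_append_left (by simp [List.length_take] <;> omega),
      List.getElem?_append_left (by simp [List.length_take] <;> omega),
      List.getElem?_take]
    simp [hk]
  · subst hk
    rw [if_neg (by omega), if_pos rfl]
    rw [List.getD_eq_getElem?_getD,
      List.getElem?_append_left (by simp [List.length_take] <;> omega),
      List.getElem?_append_right (by simp [List.length_take] <;> omega)]
    simp [List.length_take, Nat.min_eq_left (Nat.le_of_lt hq)]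
  · rw [if_neg (by omega), if_neg (by omega)]
    rw [List.getD_eq_getElem?_getD,
      List.getElem?_append_right (by simp [List.length_take] <;> omega)]
    have hlen : (ds.take q ++ [a]).length = q + 1 := by
      simp [List.length_take]; omega
    rw [hlen, List.getElem?_replicate]
    by_cases hkn : k < ds.length
    · rw [if_pos hkn, if_pos (by omega)]
      rfl
    · rw [if_neg hkn, if_neg (by omega)]
      rfl

-- decompose a list at position q
lemma split_at_getD (ds : List Int) (q : Nat) (hq : q < ds.length) :
    ds = ds.take q ++ ds.getD q 0 :: ds.drop (q + 1) := by
  conv_lhs => rw [← List.take_append_drop q ds]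
  rw [List.drop_eq_getElem_cons hq, List.getD_eq_getElem _ _ hq]

lemma lex_prefix_lt (pre s t : List Int) (a b : Int) (h : a < b) :
    pre ++ a :: s < pre ++ b :: t :=
  List.Lex.append_left _ (List.Lex.rel h) pre

lemma candT_eq_cons (ds : List Int) (q : Nat) :
    candT ds q = ds.take q ++ (ds.getD q 0 - 1) :: List.replicate (ds.length - 1 - q) 9 := by
  unfold candT
  rw [List.append_assoc]
  rfl

lemma candT_lt_self (ds : List Int) (q : Nat) (hq : q < ds.length) :
    candT ds q < ds := by
  conv_rhs => rw [split_at_getD ds q hq]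
  rw [candT_eq_cons]
  exact lex_prefix_lt _ _ _ _ _ (by omega)

lemma take_split_at (ds : List Int) (q p : Nat) (hqp : q < p) (hp : p ≤ ds.length) :
    ds.take p = ds.take q ++ ds.getD q 0 :: (ds.take p).drop (q + 1) := by
  have hlen : q < (ds.take p).length := by simp [List.length_take]; omega
  have h1 : ds.take p = (ds.take p).take q ++ (ds.take p).getD q 0 :: (ds.take p).drop (q + 1) :=
    split_at_getD (ds.take p) q hlen
  rw [List.take_take, Nat.min_eq_left (by omega)] at h1
  rw [List.getD_eq_getElem _ _ hlen, List.getElem_take,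
      ← List.getD_eq_getElem ds 0 (by omega)] at h1
  exact h1

lemma candT_lt_candT (ds : List Int) (q p : Nat) (hqp : q < p) (hp : p < ds.length) :
    candT ds q < candT ds p := by
  rw [candT_eq_cons ds q]
  conv_rhs => rw [candT_eq_cons ds p, take_split_at ds q p hqp (by omega)]
  rw [List.append_assoc, List.cons_append]
  exact lex_prefix_lt _ _ _ _ _ (by omega)

lemma mem_candsB (ds : List Int) (c : List Int) (hc : c ∈ candsB ds ds.length) :
    c = ds ∨ ∃ q : Nat, q < ds.length ∧ 1 ≤ ds.getD q 0 ∧ c = candT ds q := by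
  unfold candsB at hc
  rw [List.mem_append] at hc
  rcases hc with hc | hc
  · left
    simpa using hc
  · right
    rw [List.mem_map] at hc
    obtain ⟨x, hx, hcx⟩ := hc
    rw [List.mem_filter] at hx
    obtain ⟨hxr, hxd⟩ := hx
    rw [PySem.List.mem_pyRange_one] at hxr
    refine ⟨x.toNat, by omega, ?_, ?_⟩
    · rw [decide_eq_true_eq] at hxd
      have hxk : x = ((x.toNat : Nat) : Int) := by omega
      rwa [hxk, PySem.List.pyGetD_natCast] at hxd
    · rw [← hcx]
      have hxk : x = ((x.toNat : Nat) : Int) := by omega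
      rw [hxk, PySem.List.slice_to_natCast, PySem.List.pyGetD_natCast,
          PySem.List.pyRepeat_singleton]
      unfold candT
      congr 2
      omega

lemma candT_mem_candsB (ds : List Int) (q : Nat) (hq : q < ds.length)
    (h1 : 1 ≤ ds.getD q 0) : candT ds q ∈ candsB ds ds.length := by
  unfold candsB
  rw [List.mem_append]
  right
  rw [List.mem_map]
  refine ⟨(q : Int), ?_, ?_⟩
  · rw [List.mem_filter]
    constructor
    · rw [PySem.List.mem_pyRange_one]; omega
    · rw [decide_eq_true_eq, PySem.List.pyGetD_natCast]; exact h1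
  · rw [PySem.List.slice_to_natCast, PySem.List.pyGetD_natCast,
        PySem.List.pyRepeat_singleton]
    unfold candT
    congr 2
    omega

lemma foldl_max_top (f : Option (List Int) → List Int → Option (List Int))
    (hf1 : ∀ x, f none x = some x)
    (hf2 : ∀ m x, f (some m) x = if m < x then some x else some m)
    (xs : List (List Int)) (r : List Int) :
    ∀ acc : Option (List Int),
      (acc = some r ∨ r ∈ xs) →
      (∀ y, acc = some y → y = r ∨ y < r) →
      (∀ y ∈ xs, y = r ∨ y < r) →
      xs.foldl f acc = some r := by
  induction xs with
  | nil =>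
    intro acc h1 h2 _
    simp only [List.foldl_nil]
    rcases h1 with h1 | h1
    · exact h1
    · simp at h1
  | cons x xs ih =>
    intro acc h1 h2 h3
    simp only [List.foldl_cons]
    have hx : x = r ∨ x < r := h3 x (List.mem_cons_self)
    have h3' : ∀ y ∈ xs, y = r ∨ y < r := fun y hy => h3 y (List.mem_cons_of_mem x hy)
    cases acc with
    | none =>
      rw [hf1]
      apply ih (some x) ?_ ?_ h3'
      · rcases h1 with h1 | h1
        · simp at h1
        · rcases List.mem_cons.mp h1 with h | h
          · exact Or.inl (by rw [h])
          · exact Or.inr h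
      · intro y hy
        rw [Option.some_inj] at hy
        exact hy ▸ hx
    | some m =>
      rw [hf2]
      have hm : m = r ∨ m < r := h2 m rfl
      by_cases hlt : m < x
      · rw [if_pos hlt]
        apply ih (some x) ?_ ?_ h3'
        · rcases hx with h | h
          · exact Or.inl (by rw [h])
          · rcases h1 with h1 | h1
            · rw [Option.some_inj] at h1
              rw [h1] at hlt
              exact absurd hlt (asymm h)
            · rcases List.mem_cons.mp h1 with h' | h'
              · exact Or.inl (by rw [h'])
              · exact Or.inr h'
        · intro y hy
          rw [Option.some_inj] at hy
          exact hy ▸ hx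
      · rw [if_neg hlt]
        apply ih (some m) ?_ ?_ h3'
        · rcases h1 with h1 | h1
          · exact Or.inl h1
          · rcases List.mem_cons.mp h1 with h' | h'
            · rcases hm with hm | hm
              · exact Or.inl (by rw [hm])
              · rw [h'] at hm
                exact absurd hm hlt
            · exact Or.inr h'
        · intro y hy
          rw [Option.some_inj] at hy
          exact hy ▸ hm

lemma max?_eq_of_top (xs : List (List Int)) (r : List Int) (hmem : r ∈ xs)
    (hmax : ∀ y ∈ xs, y = r ∨ y < r) :
    PySem.List.max? xs (fun c => c) = some r := by
  unfold PySem.List.max?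
  exact foldl_max_top _ (fun x => rfl) (fun m x => rfl) xs r none (Or.inr hmem)
    (by intro y hy; simp at hy) hmax

lemma key (ds : List Int)
    (hbd : ∀ k, k < ds.length → 0 ≤ ds.getD k 0 ∧ ds.getD k 0 ≤ 9) :
    (PySem.List.max? ((candsB ds ds.length).filter tidyB) (fun c => c)).getD []
      = (if descScan ds ds.length 1 < ds.length then
          candT ds (platScan ds (descScan ds ds.length 1 - 1))
        else ds) := by
  by_cases hn0 : ds.length = 0
  · have hds : ds = [] := List.length_eq_zero_iff.mp hn0
    subst hds
    decide
  · have hn1 : 1 ≤ ds.length := by omega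
    have hj1 : 1 ≤ descScan ds ds.length 1 := descScan_ge ds ds.length 1
    have hjle : descScan ds ds.length 1 ≤ ds.length := descScan_le ds ds.length 1 hn1
    have hnondec := descScan_nondec ds ds.length 1 le_rfl
    by_cases hjn : descScan ds ds.length 1 < ds.length
    · rw [if_pos hjn]
      set j := descScan ds ds.length 1 with hjdef
      set p := platScan ds (j - 1) with hpdef
      have hdesc : ds.getD j 0 < ds.getD (j - 1) 0 := descScan_desc ds ds.length 1 le_rfl hjn
      have hpj : p ≤ j - 1 := platScan_le ds (j - 1)
      have hplateau : ∀ k, p ≤ k → k ≤ j - 1 → ds.getD k 0 = ds.getD (j - 1) 0 :=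
        platScan_plateau ds (j - 1)
      have hpn : p < ds.length := by omega
      have hppos : 0 < p → ds.getD (p - 1) 0 < ds.getD p 0 := by
        intro hp0
        have hne := platScan_stop ds (j - 1) hp0
        rw [← hpdef] at hne
        have hle := hnondec p (by omega) (by omega)
        omega
      have hdp1 : 1 ≤ ds.getD p 0 := by
        have h1 := hplateau p (le_refl p) hpj
        have h2 := (hbd j (by omega)).1
        omega
      have htidyr : tidyB (candT ds p) = true := by
        rw [tidyB_iff]
        intro k hk
        rw [candT_length ds p hpn] at hk
        rw [candT_getD ds p k hpn, candT_getD ds p (k + 1) hpn]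
        rcases Nat.lt_trichotomy (k + 1) p with hkp | hkp | hkp
        · rw [if_pos (by omega), if_pos hkp]
          have := hnondec (k + 1) (by omega) (by omega)
          simpa using this
        · rw [if_pos (by omega : k < p), if_neg (by omega), if_pos hkp]
          have h2 := hppos (by omega)
          have hk1 : p - 1 = k := by omega
          rw [hk1] at h2
          omega
        · by_cases hkp2 : k = p
          · rw [if_neg (by omega : ¬ k < p), if_pos hkp2, if_neg (by omega : ¬ k + 1 < p),
                if_neg (by omega : ¬ k + 1 = p), if_pos hk]
            have := (hbd p hpn).2
            omega
          · rw [if_neg (by omega : ¬ k < p), if_neg hkp2, if_pos (by omega : k < ds.length),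
                if_neg (by omega : ¬ k + 1 < p), if_neg (by omega : ¬ k + 1 = p), if_pos hk]
      have hmemr : candT ds p ∈ (candsB ds ds.length).filter tidyB := by
        rw [List.mem_filter]
        exact ⟨candT_mem_candsB ds p hpn hdp1, htidyr⟩
      have huntidy : tidyB ds ≠ true := by
        intro ht
        have := (tidyB_iff ds).mp ht (j - 1) (by omega)
        have hj : j - 1 + 1 = j := by omega
        rw [hj] at this
        omega
      have hmax : ∀ y ∈ (candsB ds ds.length).filter tidyB, y = candT ds p ∨ y < candT ds p := by
        intro y hy
        rw [List.mem_filter] at hy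
        obtain ⟨hyc, hyt⟩ := hy
        rcases mem_candsB ds y hyc with hyd | ⟨q, hqn, hq1, hyq⟩
        · exact absurd (hyd ▸ hyt) huntidy
        · subst hyq
          rcases Nat.lt_trichotomy q p with hqp | hqp | hqp
          · exact Or.inr (candT_lt_candT ds q p hqp hpn)
          · exact Or.inl (by rw [hqp])
          · exfalso
            have htq := (tidyB_iff _).mp hyt
            rcases Nat.lt_trichotomy q j with hqj | hqj | hqj
            · have h1 := htq (q - 1) (by rw [candT_length ds q hqn]; omega)
              have hq : q - 1 + 1 = q := by omega
              rw [hq, candT_getD ds q (q - 1) hqn, candT_getD ds q q hqn] at h1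
              rw [if_pos (by omega), if_neg (by omega), if_pos rfl] at h1
              have e1 := hplateau (q - 1) (by omega) (by omega)
              have e2 := hplateau q (by omega) (by omega)
              omega
            · have h1 := htq (j - 1) (by rw [candT_length ds q hqn]; omega)
              have hj : j - 1 + 1 = j := by omega
              rw [hj, candT_getD ds q (j - 1) hqn, candT_getD ds q j hqn] at h1
              rw [if_pos (by omega), if_neg (by omega), if_pos hqj.symm] at h1
              rw [hqj] at h1
              omega
            · have h1 := htq (j - 1) (by rw [candT_length ds q hqn]; omega)
              have hj : j - 1 + 1 = j := by omega
              rw [hj, candT_getD ds q (j - 1) hqn, candT_getD ds q j hqn] at h1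
              rw [if_pos (by omega), if_pos (by omega)] at h1
              omega
      rw [max?_eq_of_top _ _ hmemr hmax]
      rfl
    · rw [if_neg hjn]
      have hjeq : descScan ds ds.length 1 = ds.length := by omega
      have htidy : tidyB ds = true := by
        rw [tidyB_iff]
        intro k hk
        have := hnondec (k + 1) (by omega) (by omega)
        simpa using this
      have hmem : ds ∈ (candsB ds ds.length).filter tidyB := by
        rw [List.mem_filter]
        refine ⟨?_, htidy⟩
        unfold candsB
        simp
      have hmax : ∀ y ∈ (candsB ds ds.length).filter tidyB, y = ds ∨ y < ds := by
        intro y hy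
        rw [List.mem_filter] at hy
        rcases mem_candsB ds y hy.1 with hyd | ⟨q, hqn, _, hyq⟩
        · exact Or.inl hyd
        · exact Or.inr (hyq ▸ candT_lt_self ds q hqn)
      rw [max?_eq_of_top _ _ hmem hmax]
      rfl

lemma ofStr_digit (c : Char) (h : PySem.Chars.isdigit c = true) :
    ∃ d : Int, PySem.Int.ofStr? (String.ofList [c]) = some d ∧ 0 ≤ d ∧ d ≤ 9 := by
  simp only [PySem.Chars.isdigit, Bool.and_eq_true, decide_eq_true_eq] at h
  obtain ⟨h1, h2⟩ := h
  rw [Char.le_def] at h1 h2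
  have h1' : 48 ≤ c.toNat := h1
  have h2' : c.toNat ≤ 57 := h2
  have hc : c = Char.ofNat c.toNat := by rw [Char.ofNat_toNat]
  refine ⟨(c.toNat : Int) - 48, ?_, by omega, by omega⟩
  have hof : PySem.Int.ofStr? (String.ofList [c]) = PySem.Int.ofChars? [c] := by
    simp [PySem.Int.ofStr?]
  rw [hof]
  set m := c.toNat with hm
  interval_cases m <;> rw [hc] <;> decide

lemma digits_bounds (cs : List Char) (hall : ∀ c ∈ cs, PySem.Chars.isdigit c = true) :
    ∀ k, k < (cs.map (fun c => (PySem.Int.ofStr? (String.ofList [c])).getD 0)).length →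
      0 ≤ (cs.map (fun c => (PySem.Int.ofStr? (String.ofList [c])).getD 0)).getD k 0 ∧
      (cs.map (fun c => (PySem.Int.ofStr? (String.ofList [c])).getD 0)).getD k 0 ≤ 9 := by
  intro k hk
  rw [List.length_map] at hk
  rw [List.getD_eq_getElem _ _ (by simpa using hk), List.getElem_map]
  obtain ⟨d, hd, h0, h9⟩ := ofStr_digit cs[k] (hall _ (List.getElem_mem hk))
  rw [hd]
  exact ⟨h0, h9⟩

-- ===== VERDICT =====
theorem solve_spec : Claim_equal_solve := by
  intro test _ hpre
  obtain ⟨hne, hdig⟩ := hpre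
  unfold Spec_solve
  show solve test = solve_alt test
  unfold solve solve_alt parse_input
  have htok : (PySem.List.pyGet? (PySem.Str.split₀ test) 0).getD "" =
      (PySem.Str.split₀ test).headD "" := by
    cases h : PySem.Str.split₀ test with
    | nil => exact absurd h hne
    | cons a l => rw [PySem.List.pyGet?_zero_cons]; rfl
  have hall : ∀ c ∈ ((PySem.List.pyGet? (PySem.Str.split₀ test) 0).getD "").toList,
      PySem.Chars.isdigit c = true := by
    rw [htok]
    unfold PySem.Chars.strIsdigit at hdig
    rw [Bool.and_eq_true, List.all_eq_true] at hdig
    exact fun c hc => hdig.2 c hc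
  have hbd := digits_bounds _ hall
  have hlist := (key _ hbd).trans (lists_eq _).symm
  simp only []
  rw [hlist]
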